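-- pv_equiv track=rewrite | github.com/onooff/algorithm | programmers/p140108.py | solution
-- ===== SOURCE A (Python) =====
-- def solution(s):
--     ans = 0
--     first = False
--     cnt = 0
--     for i, c in enumerate(s):
--         if not first:
--             ans += 1
--             first = c
--             cnt = 1
--         else:
--             if c == first:
--                 cnt += 1
--             else:
--                 cnt -= 1
--         if cnt == 0:
--             first = False
--
--     return ans
-- ===== SOURCE B (Python) =====
-- def solution(s):
--     # A group starting a string with leader x ends at the shortest prefix whose
--     # length is exactly twice the number of occurrences of x in it (half match,
--     # half don't); if no prefix satisfies that, the whole remainder is one group.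
--     groups = 0
--     while s:
--         groups += 1
--         x = s[0]
--         matches = 0
--         cut = len(s)
--         for j, c in enumerate(s):
--             matches += (c == x)
--             if 2 * matches == j + 1:
--                 cut = j + 1
--                 break
--         s = s[cut:]
--     return groups
-- ===== Notes on version B (the rewrite author's own statement) =====
-- stated objective: alternative
-- what changed: Instead of A's running +1/-1 balance with a flag reset inside one for-loop, B repeatedly cuts off the leading group by searching for the shortest prefix whose length equals twice the count of its first character, then slices the string past that cut; it maintains an occurrence count compared against the prefix length, never a signed balance.
import Mathlib
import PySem

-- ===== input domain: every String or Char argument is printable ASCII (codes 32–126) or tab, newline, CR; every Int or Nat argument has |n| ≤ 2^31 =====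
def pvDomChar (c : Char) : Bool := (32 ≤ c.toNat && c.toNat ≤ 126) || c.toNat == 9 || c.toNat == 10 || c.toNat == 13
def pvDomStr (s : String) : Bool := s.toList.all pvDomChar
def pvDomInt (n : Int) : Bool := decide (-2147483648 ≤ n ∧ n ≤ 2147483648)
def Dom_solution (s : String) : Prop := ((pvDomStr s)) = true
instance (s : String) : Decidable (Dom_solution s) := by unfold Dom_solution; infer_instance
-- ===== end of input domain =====

-- B replaces A's signed-balance single pass by repeatedly slicing off the leading group at the
-- shortest prefix whose length is twice the leader's occurrence count (alternative decomposition, same cost).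

-- ===== PORT A =====
-- state = (ans, first, cnt); Python's 'first = False' / 'first = c' is Option Char (none / some c)
def pvStepA (st : Int × Option Char × Int) (c : Char) : Int × Option Char × Int :=
  let st2 : Int × Option Char × Int :=
    match st.2.1 with
    | none => (st.1 + 1, some c, 1)
    | some f => if c == f then (st.1, st.2.1, st.2.2 + 1) else (st.1, st.2.1, st.2.2 - 1)
  if st2.2.2 == 0 then (st2.1, none, st2.2.2) else st2

def solution (s : String) : Int :=
  (s.toList.foldl pvStepA (0, none, 0)).1

-- ===== PORT B =====
-- inner for-loop of Source B: first j with 2*matches == j+1 gives cut = some (j+1); none = no break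
def pvCut (x : Char) (l : List Char) (j m : Nat) : Option Nat :=
  match l with
  | [] => none
  | c :: rest =>
    let m' := m + (if c == x then 1 else 0)
    if 2 * m' == j + 1 then some (j + 1) else pvCut x rest (j + 1) m'

-- the cut index is past the current position (cited by pvOuter's decreasing_by)
theorem pvCut_ge (x : Char) : ∀ (l : List Char) (j m k : Nat), pvCut x l j m = some k → j + 1 ≤ k := by
  intro l
  induction l with
  | nil => intro j m k h; simp [pvCut] at h
  | cons c rest ih =>
    intro j m k h
    simp only [pvCut] at h
    split at h <;> split at h <;>
      first
        | (cases h; omega)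
        | (have := ih (j + 1) _ k h; omega)

-- outer while-loop of Source B: count the leading group, slice it off, continue with the remainder
-- (s[cut:] with 0 ≤ cut ≤ len is exactly List.drop cut)
def pvOuter (l : List Char) (groups : Int) : Int :=
  match hl : l with
  | [] => groups
  | x :: rest =>
    let cut := (pvCut x l 0 0).getD l.length
    pvOuter (l.drop cut) (groups + 1)
termination_by l.length
decreasing_by
  subst hl
  have h1 : 1 ≤ (pvCut x (x :: rest) 0 0).getD (x :: rest).length := by
    cases hc : pvCut x (x :: rest) 0 0 with
    | none => simp
    | some k => simpa using pvCut_ge x (x :: rest) 0 0 k hc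
  simp only [List.length_drop, List.length_cons] at h1 ⊢
  omega

def solution_alt (s : String) : Int :=
  pvOuter s.toList 0

-- ===== PRECONDITION & SPEC =====
def Spec_solution (s : String) (out : Int) : Prop := out = solution_alt s
instance (s : String) (out : Int) : Decidable (Spec_solution s out) := by unfold Spec_solution; infer_instance

-- ===== CLAIM (what is proved, stated in full; the proofs are below) =====
def Claim_equal_solution : Prop := ∀ (s : String), Dom_solution s → Spec_solution s (solution s)

-- ===== LEMMAS AND PROOFS =====

-- proof-only helper: the suffix left after consuming one group with running balance bal
def pvConsume (leader : Char) (bal : Int) (l : List Char) : List Char :=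
  match l with
  | [] => []
  | c :: rest =>
    if bal == 0 then c :: rest
    else pvConsume leader (bal + (if c == leader then 1 else -1)) rest

theorem pvConsume_len (leader : Char) : ∀ (bal : Int) (l : List Char),
    (pvConsume leader bal l).length ≤ l.length := by
  intro bal l
  induction l generalizing bal with
  | nil => simp [pvConsume]
  | cons c rest ih =>
    simp only [pvConsume]
    split
    · simp
    · exact le_trans (ih _) (by simp)

-- proof-only helper: group counting phrased via pvConsume, the common form both ports reduce to
def pvGroups (l : List Char) (ans : Int) : Int :=
  match l with
  | [] => ans
  | c :: rest => pvGroups (pvConsume c 1 rest) (ans + 1)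
termination_by l.length
decreasing_by
  exact Nat.lt_succ_of_le (pvConsume_len c 1 rest)

theorem pvConsume_zero (leader : Char) (l : List Char) : pvConsume leader 0 l = l := by
  cases l <;> simp [pvConsume]

-- joint invariant for A's idle state and in-group state, by strong induction on length
theorem pv_both (n : Nat) : ∀ l : List Char, l.length ≤ n →
    (∀ ans : Int, (List.foldl pvStepA (ans, none, 0) l).1 = pvGroups l ans) ∧
    (∀ (ans : Int) (f : Char) (cnt : Int), cnt ≠ 0 →
      (List.foldl pvStepA (ans, some f, cnt) l).1 = pvGroups (pvConsume f cnt l) ans) := by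
  induction n with
  | zero =>
    intro l hl
    have : l = [] := List.eq_nil_of_length_eq_zero (Nat.le_zero.mp hl)
    subst this
    constructor
    · intro ans; simp [pvGroups]
    · intro ans f cnt _; simp [pvConsume, pvGroups]
  | succ n ih =>
    intro l hl
    cases l with
    | nil =>
      constructor
      · intro ans; simp [pvGroups]
      · intro ans f cnt _; simp [pvConsume, pvGroups]
    | cons c rest =>
      have hr : rest.length ≤ n := Nat.le_of_succ_le_succ hl
      constructor
      · intro ans
        have h1 : pvStepA (ans, none, 0) c = (ans + 1, some c, 1) := by
          simp [pvStepA]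
        rw [List.foldl_cons, h1, (ih rest hr).2 (ans + 1) c 1 one_ne_zero]
        simp [pvGroups]
      · intro ans f cnt hcnt
        have hcons : pvConsume f cnt (c :: rest)
            = pvConsume f (cnt + (if c == f then 1 else -1)) rest := by
          simp [pvConsume, hcnt]
        set cnt' : Int := cnt + (if c == f then 1 else -1) with hcnt'
        have hstep : pvStepA (ans, some f, cnt) c =
            if cnt' == 0 then (ans, none, cnt') else (ans, some f, cnt') := by
          simp only [pvStepA, hcnt']
          by_cases hc : c == f <;> simp [hc] <;> ring_nf
        rw [List.foldl_cons, hstep, hcons]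
        by_cases h0 : cnt' = 0
        · rw [if_pos (by simpa using h0), h0, pvConsume_zero]
          exact (ih rest hr).1 ans
        · rw [if_neg (by simpa using h0)]
          exact (ih rest hr).2 ans f cnt' h0

-- the getD value is at least the start index
theorem pvCut_getD_ge (x : Char) (l : List Char) (j m : Nat) :
    j ≤ (pvCut x l j m).getD (j + l.length) := by
  cases hk : pvCut x l j m with
  | none => simp
  | some k => have := pvCut_ge x l j m k hk; simpa using le_of_lt (by omega : j < k)

-- B's inner search and the balance-consumption agree: dropping at the cut = pvConsume,
-- via the correspondence bal = 2*matches - consumed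
theorem pv_cut_consume (x : Char) : ∀ (rest : List Char) (j m : Nat),
    (2 * (m : Int) - (j : Int) ≠ 0) →
    rest.drop (((pvCut x rest j m).getD (j + rest.length)) - j)
      = pvConsume x (2 * (m : Int) - (j : Int)) rest := by
  intro rest
  induction rest with
  | nil => intro j m h; simp [pvCut, pvConsume]
  | cons c rest ih =>
    intro j m h
    have hbal : ((2 * (m : Int) - (j : Int)) == 0) = false := by simpa using h
    have harg : j + (c :: rest).length = j + 1 + rest.length := by simp; omega
    simp only [pvCut, pvConsume, hbal, Bool.false_eq_true, if_false, harg]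
    by_cases hc : (c == x) = true
    · simp only [hc, if_true]
      by_cases hcut : (2 * (m + 1) == j + 1) = true
      · have hEq : 2 * (m + 1) = j + 1 := by simpa using hcut
        have h0 : 2 * (m : Int) - (j : Int) + 1 = 0 := by omega
        have hdj : j + 1 - j = 1 := by omega
        simp only [hcut, if_true, h0, pvConsume_zero, Option.getD_some, hdj,
          List.drop_succ_cons, List.drop_zero]
      · have hEq : ¬ (2 * (m + 1) = j + 1) := by simpa using hcut
        have hne : 2 * ((m : Int) + 1) - ((j : Int) + 1) ≠ 0 := by omega
        simp only [hcut, Bool.false_eq_true, if_false]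
        set K := (pvCut x rest (j + 1) (m + 1)).getD (j + 1 + rest.length) with hKdef
        have hK : j + 1 ≤ K := pvCut_getD_ge x rest (j + 1) (m + 1)
        have hsplit : K - j = (K - (j + 1)) + 1 := by omega
        rw [hsplit, List.drop_succ_cons]
        have hih := ih (j + 1) (m + 1) (by push_cast; exact hne)
        rw [← hKdef] at hih
        rw [hih]
        congr 1
        push_cast
        ring
    · have hc' : (c == x) = false := by simpa using hc
      simp only [hc', Bool.false_eq_true, if_false, Nat.add_zero]
      by_cases hcut : (2 * m == j + 1) = true
      · have hEq : 2 * m = j + 1 := by simpa using hcut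
        have h0 : 2 * (m : Int) - (j : Int) + (-1) = 0 := by omega
        have hdj : j + 1 - j = 1 := by omega
        simp only [hcut, if_true, h0, pvConsume_zero, Option.getD_some, hdj,
          List.drop_succ_cons, List.drop_zero]
      · have hEq : ¬ (2 * m = j + 1) := by simpa using hcut
        have hne : 2 * (m : Int) - ((j : Int) + 1) ≠ 0 := by omega
        simp only [hcut, Bool.false_eq_true, if_false]
        set K := (pvCut x rest (j + 1) m).getD (j + 1 + rest.length) with hKdef
        have hK : j + 1 ≤ K := pvCut_getD_ge x rest (j + 1) m
        have hsplit : K - j = (K - (j + 1)) + 1 := by omega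
        rw [hsplit, List.drop_succ_cons]
        have hih := ih (j + 1) m (by push_cast; exact hne)
        rw [← hKdef] at hih
        rw [hih]
        congr 1
        push_cast
        ring

-- B equals the common pvGroups form
theorem pv_outer_groups : ∀ (n : Nat) (l : List Char), l.length ≤ n →
    ∀ g : Int, pvOuter l g = pvGroups l g := by
  intro n
  induction n with
  | zero =>
    intro l hl g
    have : l = [] := List.eq_nil_of_length_eq_zero (Nat.le_zero.mp hl)
    subst this; rw [pvOuter, pvGroups]
  | succ n ih =>
    intro l hl g
    cases l with
    | nil => rw [pvOuter, pvGroups]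
    | cons x rest =>
      rw [pvOuter]
      have hstep : pvCut x (x :: rest) 0 0 = pvCut x rest 1 1 := by
        simp [pvCut]
      have hlen : (x :: rest).length = 1 + rest.length := by simp; omega
      rw [hstep, hlen]
      set K := (pvCut x rest 1 1).getD (1 + rest.length) with hKdef
      have hK : 1 ≤ K := pvCut_getD_ge x rest 1 1
      have hsplit : K = (K - 1) + 1 := by omega
      rw [hsplit, List.drop_succ_cons]
      have hdrop : rest.drop (K - 1) = pvConsume x 1 rest := by
        have := pv_cut_consume x rest 1 1 (by norm_num)
        rw [← hKdef] at this
        simpa using this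
      rw [hdrop]
      rw [ih (pvConsume x 1 rest)
        (le_trans (pvConsume_len x 1 rest) (Nat.le_of_succ_le_succ hl)) (g + 1)]
      rw [pvGroups]

-- ===== VERDICT (by name: the statement is the Claim_ definition above) =====
theorem solution_spec : Claim_equal_solution := by
  intro s _
  unfold Spec_solution solution solution_alt
  rw [pv_outer_groups s.toList.length s.toList le_rfl 0]
  exact (pv_both s.toList.length s.toList le_rfl).1 0
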